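-- pv_equiv track=rewrite | github.com/image-scale/salesforce--policy_sentry | policy_sentry/writing/minimize.py | _minimize_service_actions
-- ===== SOURCE A (Python) =====
-- def _minimize_service_actions(
--     service: str, target_actions: set[str], service_all_actions: set[str], minchars: int
-- ) -> list[str]:
--     """
--     Minimize actions for a single service.
--
--     Arguments:
--         service: The service prefix (lowercase)
--         target_actions: Set of action names we want to match (without service prefix, lowercase)
--         service_all_actions: Set of all possible action names for this service (lowercase)
--         minchars: Minimum number of characters before the wildcard
--
--     Returns:
--         List: A minimized list of actions with service prefix
--     """
--     results = []
--     covered = set()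
--
--     # Process actions sorted by name for consistent output
--     sorted_targets = sorted(target_actions)
--
--     for target in sorted_targets:
--         if target in covered:
--             continue
--
--         # Find the shortest prefix that matches this target and possibly other targets,
--         # but does NOT match any non-target actions
--         best_prefix = None
--         best_covered = set()
--
--         # Start from shortest possible prefix and go longer
--         min_len = max(1, minchars)
--         for prefix_len in range(min_len, len(target) + 1):
--             prefix = target[:prefix_len]
--
--             # Find all targets that match this prefix
--             matching_targets = {a for a in target_actions if a.startswith(prefix)}
--
--             # Find all actions (targets + non-targets) that match this prefix
--             matching_all = {a for a in service_all_actions if a.startswith(prefix)}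
--
--             # This prefix is valid if it ONLY matches target actions
--             if matching_all == matching_targets:
--                 # Check if this is better than what we have
--                 # Prefer prefixes that cover more targets
--                 if best_prefix is None or len(matching_targets) > len(best_covered):
--                     best_prefix = prefix
--                     best_covered = matching_targets
--                 # If we found a valid prefix, don't go longer - we want the shortest
--                 break
--
--         if best_prefix is not None:
--             # Use wildcard if the prefix matches more than just the exact action
--             if len(best_prefix) < len(target) or len(best_covered) > 1:
--                 results.append(f"{service}:{best_prefix}*")
--             else:
--                 # Exact match, no wildcard needed
--                 results.append(f"{service}:{target}")
--             covered.update(best_covered)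
--         else:
--             # Couldn't find a valid prefix, use the exact action
--             results.append(f"{service}:{target}")
--             covered.add(target)
--
--     return results
-- ===== SOURCE B (Python) =====
-- def _minimize_service_actions(
--     service: str, target_actions: set[str], service_all_actions: set[str], minchars: int
-- ) -> list[str]:
--     """Prefix-count index version: build dicts of prefix counts once, so each
--     candidate prefix is validated by one count comparison instead of a scan
--     of both whole action sets."""
--
--     def add_prefix_counts(strings, cnt):
--         for a in strings:
--             for k in range(1, len(a) + 1):
--                 p = a[:k]
--                 cnt[p] = cnt.get(p, 0) + 1
--
--     cnt_t = {}
--     cnt_a = {}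
--     cnt_u = {}
--     add_prefix_counts(target_actions, cnt_t)
--     add_prefix_counts(service_all_actions, cnt_a)
--     add_prefix_counts(target_actions | service_all_actions, cnt_u)
--
--     results = []
--     covered = set()
--     min_len = max(1, minchars)
--
--     for target in sorted(target_actions):
--         if target in covered:
--             continue
--
--         best = None
--         for k in range(min_len, len(target) + 1):
--             p = target[:k]
--             # valid iff the targets and the whole action set agree on this prefix:
--             # both counts then equal the count in the union of the two sets
--             if cnt_a.get(p, 0) == cnt_t.get(p, 0) == cnt_u.get(p, 0):
--                 best = p
--                 break
--
--         if best is None: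
--             results.append(f"{service}:{target}")
--             covered.add(target)
--         else:
--             matched = {a for a in target_actions if a.startswith(best)}
--             if len(best) < len(target) or len(matched) > 1:
--                 results.append(f"{service}:{best}*")
--             else:
--                 results.append(f"{service}:{target}")
--             covered |= matched
--     return results
-- ===== Notes on version B (the rewrite author's own statement) =====
-- stated objective: alternative
-- what changed: Instead of rebuilding and comparing the matching-action sets for every candidate prefix (a scan of both whole sets per prefix), B precomputes three prefix-count dictionaries (targets, all actions, and their union) in one pass and validates each candidate prefix by a single count comparison (counts agree iff the matching sets are equal).
import Mathlib
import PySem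

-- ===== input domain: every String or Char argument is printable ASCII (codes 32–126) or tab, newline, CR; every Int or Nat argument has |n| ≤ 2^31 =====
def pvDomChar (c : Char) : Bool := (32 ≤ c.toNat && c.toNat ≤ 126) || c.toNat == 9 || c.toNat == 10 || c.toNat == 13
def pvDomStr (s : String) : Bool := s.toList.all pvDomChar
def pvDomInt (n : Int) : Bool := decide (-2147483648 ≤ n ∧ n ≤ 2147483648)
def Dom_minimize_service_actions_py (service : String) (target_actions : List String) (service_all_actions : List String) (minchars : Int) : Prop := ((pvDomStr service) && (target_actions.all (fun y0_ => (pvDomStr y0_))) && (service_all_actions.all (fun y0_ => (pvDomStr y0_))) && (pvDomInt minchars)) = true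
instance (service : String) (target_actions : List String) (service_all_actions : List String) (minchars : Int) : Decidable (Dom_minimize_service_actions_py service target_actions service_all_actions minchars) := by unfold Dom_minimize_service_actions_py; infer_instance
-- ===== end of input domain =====

-- B replaces A's per-prefix rebuild-and-compare of the two matching-action sets by three
-- prefix-count dictionaries built once, so each candidate prefix is checked by a single
-- count comparison; objective: alternative.

-- ===== PORT A =====

-- {a for a in xs if a.startswith(pre)}  (this comprehension appears verbatim in both Pythons)
def pvMatchSet (xs : List String) (pre : String) : PySem.Set String :=
  PySem.Set.ofList (xs.filter (fun a => PySem.Str.startswith a pre))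

-- A's inner 'for prefix_len in range(...)' loop with its break, threading best_prefix/best_covered
def pvFindA (tgt all : List String) (target : String)
    (best : Option String) (bestCov : PySem.Set String) :
    List Int → Option String × PySem.Set String
  | [] => (best, bestCov)
  | k :: _ks =>
    let pre := PySem.Str.slice target none (some k)
    let mt := pvMatchSet tgt pre
    let ma := pvMatchSet all pre
    if PySem.Set.equal ma mt then
      -- 'if best_prefix is None or len(matching_targets) > len(best_covered)', then break
      if best.isNone || PySem.Set.len mt > PySem.Set.len bestCov then (some pre, mt)
      else (best, bestCov)
    else pvFindA tgt all target best bestCov _ks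

-- A's outer 'for target in sorted_targets' loop with its results/covered state
def pvLoopA (service : String) (tgt all : List String) (minLen : Int) :
    List String → List String × PySem.Set String → List String × PySem.Set String
  | [], st => st
  | t :: ts, (results, covered) =>
    if PySem.Set.contains covered t then
      pvLoopA service tgt all minLen ts (results, covered)
    else
      match pvFindA tgt all t none PySem.Set.empty
          (PySem.List.pyRange minLen (PySem.Str.len t + 1)) with
      | (some best, bestCov) =>
        if PySem.Str.len best < PySem.Str.len t || PySem.Set.len bestCov > 1 then
          pvLoopA service tgt all minLen ts
            (results ++ [service ++ ":" ++ best ++ "*"], PySem.Set.update covered bestCov)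
        else
          pvLoopA service tgt all minLen ts
            (results ++ [service ++ ":" ++ t], PySem.Set.update covered bestCov)
      | (none, _) =>
        pvLoopA service tgt all minLen ts
          (results ++ [service ++ ":" ++ t], PySem.Set.add covered t)

def minimize_service_actions_py (service : String) (target_actions : List String) (service_all_actions : List String) (minchars : Int) : List String :=
  (pvLoopA service target_actions service_all_actions (max 1 minchars)
    (PySem.List.sorted target_actions (fun x => x)) ([], PySem.Set.empty)).1

-- ===== PORT B =====

-- the inner loop of add_prefix_counts ranges over [a[:k] for k in range(1, len(a)+1)]
def pvPrefixes (a : String) : List String :=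
  (PySem.List.pyRange 1 (PySem.Str.len a + 1)).map
    (fun k => PySem.Str.slice a none (some k))

-- add_prefix_counts: cnt[p] = cnt.get(p, 0) + 1 over every prefix of every string
def pvCnt (xs : List String) : PySem.Dict String Int :=
  xs.foldl
    (fun d a => (pvPrefixes a).foldl (fun d p => d.insert p (d.getD p 0 + 1)) d)
    PySem.Dict.empty

-- cnt_a.get(p,0) == cnt_t.get(p,0) == cnt_u.get(p,0)
def pvValidB (cntT cntA cntU : PySem.Dict String Int) (p : String) : Bool :=
  cntA.getD p 0 == cntT.getD p 0 && cntT.getD p 0 == cntU.getD p 0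

-- B's inner search: first k in the range whose prefix passes the count test
def pvFindB (cntT cntA cntU : PySem.Dict String Int) (target : String) :
    List Int → Option String
  | [] => none
  | k :: ks =>
    let p := PySem.Str.slice target none (some k)
    if pvValidB cntT cntA cntU p then some p
    else pvFindB cntT cntA cntU target ks

-- B's outer loop
def pvLoopB (service : String) (tgt : List String) (cntT cntA cntU : PySem.Dict String Int)
    (minLen : Int) :
    List String → List String × PySem.Set String → List String × PySem.Set String
  | [], st => st
  | t :: ts, (results, covered) =>
    if PySem.Set.contains covered t then
      pvLoopB service tgt cntT cntA cntU minLen ts (results, covered)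
    else
      match pvFindB cntT cntA cntU t (PySem.List.pyRange minLen (PySem.Str.len t + 1)) with
      | none =>
        pvLoopB service tgt cntT cntA cntU minLen ts
          (results ++ [service ++ ":" ++ t], PySem.Set.add covered t)
      | some best =>
        let matched := pvMatchSet tgt best
        if PySem.Str.len best < PySem.Str.len t || PySem.Set.len matched > 1 then
          pvLoopB service tgt cntT cntA cntU minLen ts
            (results ++ [service ++ ":" ++ best ++ "*"], PySem.Set.update covered matched)
        else
          pvLoopB service tgt cntT cntA cntU minLen ts
            (results ++ [service ++ ":" ++ t], PySem.Set.update covered matched)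

def minimize_service_actions_py_alt (service : String) (target_actions : List String) (service_all_actions : List String) (minchars : Int) : List String :=
  let tset := PySem.Set.ofList target_actions
  let aset := PySem.Set.ofList service_all_actions
  let uset := PySem.Set.union tset aset
  (pvLoopB service target_actions (pvCnt tset) (pvCnt aset) (pvCnt uset) (max 1 minchars)
    (PySem.List.sorted target_actions (fun x => x)) ([], PySem.Set.empty)).1

-- ===== PRECONDITION & SPEC =====
def Spec_minimize_service_actions_py (service : String) (target_actions : List String) (service_all_actions : List String) (minchars : Int) (out : List String) : Prop := out = minimize_service_actions_py_alt service target_actions service_all_actions minchars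
instance (service : String) (target_actions : List String) (service_all_actions : List String) (minchars : Int) (out : List String) : Decidable (Spec_minimize_service_actions_py service target_actions service_all_actions minchars out) := by unfold Spec_minimize_service_actions_py; infer_instance

-- ===== CLAIM (what is proved, stated in full; the proofs are below) =====
def Claim_equal_minimize_service_actions_py : Prop := ∀ (service : String) (target_actions : List String) (service_all_actions : List String) (minchars : Int), Dom_minimize_service_actions_py service target_actions service_all_actions minchars → Spec_minimize_service_actions_py service target_actions service_all_actions minchars (minimize_service_actions_py service target_actions service_all_actions minchars)

-- ===== LEMMAS AND PROOFS =====

theorem pv_pyRange_nil {a b : Int} (h : b ≤ a) : PySem.List.pyRange a b = [] := by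
  by_contra hne
  rcases List.exists_mem_of_ne_nil _ hne with ⟨x, hx⟩
  have := PySem.List.mem_pyRange_one.mp hx
  omega

-- a step-1 range lists each admitted value exactly once
theorem pv_count_pyRange (a b k : Int) :
    (PySem.List.pyRange a b).count k = if a ≤ k ∧ k < b then 1 else 0 := by
  have hd : ∀ n : Nat, ∀ a : Int, (b - a).toNat = n →
      (PySem.List.pyRange a b).count k = if a ≤ k ∧ k < b then 1 else 0 := by
    intro n
    induction n with
    | zero =>
      intro a ha
      rw [pv_pyRange_nil (by omega)]
      simp
      omega
    | succ m ih =>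
      intro a ha
      have hab : a < b := by omega
      rw [PySem.List.pyRange_one_cons hab, List.count_cons]
      rw [ih (a + 1) (by omega)]
      by_cases hk : k = a
      · subst hk
        simp
        omega
      · simp
        split_ifs <;> omega
  exact hd (b - a).toNat a rfl

-- a[:k] for 0 ≤ k is take
theorem pv_toList_slice_to (s : String) (k : Int) (hk : 0 ≤ k) :
    (PySem.Str.slice s none (some k)).toList = s.toList.take k.toNat := by
  rw [PySem.Str.toList_slice, PySem.Chars.slice_eq_listSlice, PySem.List.slice_to _ hk]

-- a nonempty p occurs in pvPrefixes a exactly when p is a prefix of a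
theorem pv_count_pvPrefixes (a p : String) (hp : p.toList ≠ []) :
    (pvPrefixes a).count p = if PySem.Str.startswith a p then 1 else 0 := by
  have hf : ∀ k : Int, k ∈ PySem.List.pyRange 1 (PySem.Str.len a + 1) →
      (PySem.Str.slice a none (some k) = p ↔
        (PySem.Str.startswith a p = true ∧ k = (p.toList.length : Int))) := by
    intro k hk
    have hb := PySem.List.mem_pyRange_one.mp hk
    have h0 : (0:Int) ≤ k := by omega
    have hlen : k ≤ (a.toList.length : Int) := by
      have h2 := hb.2
      rw [PySem.Str.len_eq] at h2
      omega
    constructor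
    · intro he
      have ht : p.toList = a.toList.take k.toNat := by
        rw [← he, pv_toList_slice_to a k h0]
      have hpre : p.toList <+: a.toList := ht ▸ List.take_prefix _ _
      have hsw : PySem.Str.startswith a p = true := by
        rw [PySem.Str.startswith_eq, PySem.Chars.startswith_iff]
        exact hpre
      have hl : p.toList.length = k.toNat := by
        rw [ht, List.length_take]
        omega
      exact ⟨hsw, by omega⟩
    · rintro ⟨hsw, hk'⟩
      rw [PySem.Str.startswith_eq, PySem.Chars.startswith_iff] at hsw
      apply String.toList_inj.mp
      rw [pv_toList_slice_to _ _ h0]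
      have : k.toNat = p.toList.length := by omega
      rw [this]
      exact (List.prefix_iff_eq_take.mp hsw).symm
  rw [pvPrefixes, List.count, List.countP_map]
  cases hsw : PySem.Str.startswith a p with
  | false =>
    simp only [Bool.false_eq_true, if_false]
    rw [List.countP_eq_zero]
    intro k hk
    simp only [Function.comp]
    intro hcon
    have := (hf k hk).mp (by simpa using hcon)
    rw [hsw] at this
    exact absurd this.1 (by simp)
  | true =>
    have hm1 : 1 ≤ (p.toList.length : Int) := by
      have : p.toList.length ≠ 0 := by simpa using hp
      omega
    have hm2 : (p.toList.length : Int) < PySem.Str.len a + 1 := by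
      rw [PySem.Str.startswith_eq, PySem.Chars.startswith_iff] at hsw
      have := List.IsPrefix.length_le hsw
      rw [PySem.Str.len_eq]
      omega
    have hcong : List.countP ((fun x => x == p) ∘ (fun k => PySem.Str.slice a none (some k)))
        (PySem.List.pyRange 1 (PySem.Str.len a + 1))
        = List.count ((p.toList.length : Int)) (PySem.List.pyRange 1 (PySem.Str.len a + 1)) := by
      rw [List.count]
      apply List.countP_congr
      intro k hk
      simp only [Function.comp, beq_iff_eq]
      constructor
      · intro hc
        exact ((hf k hk).mp hc).2
      · intro hke
        exact (hf k hk).mpr ⟨hsw, hke⟩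
    rw [hcong, pv_count_pyRange]
    simp only [if_pos (And.intro hm1 hm2), if_true]

-- the counter lookup is the number of listed strings with prefix p
theorem pv_getD_pvCnt (xs : List String) (p : String) (hp : p.toList ≠ []) :
    (pvCnt xs).getD p 0 = ((xs.filter (fun a => PySem.Str.startswith a p)).length : Int) := by
  have main : ∀ (ys : List String) (d : PySem.Dict String Int),
      (ys.foldl (fun d a => (pvPrefixes a).foldl (fun d p => d.insert p (d.getD p 0 + 1)) d) d).getD p 0
        = d.getD p 0 + ((ys.filter (fun a => PySem.Str.startswith a p)).length : Int) := by
    intro ys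
    induction ys with
    | nil => intro d; simp
    | cons a ys ih =>
      intro d
      rw [List.foldl_cons, ih, PySem.Dict.getD_foldl_insert_add_one,
        pv_count_pvPrefixes a p hp, List.filter_cons]
      by_cases hsw : PySem.Str.startswith a p = true
      · rw [if_pos hsw]
        simp only [hsw, if_true, List.length_cons]
        push_cast
        ring
      · rw [if_neg hsw]
        simp only [Bool.not_eq_true] at hsw
        simp only [hsw, Bool.false_eq_true, if_false]
        ring
  rw [pvCnt, main]
  simp

-- B's count test equals A's set-equality test
theorem pv_validB_eq (tgt all : List String) (p : String) (hp : p.toList ≠ []) :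
    pvValidB (pvCnt (PySem.Set.ofList tgt)) (pvCnt (PySem.Set.ofList all))
      (pvCnt (PySem.Set.union (PySem.Set.ofList tgt) (PySem.Set.ofList all))) p
      = PySem.Set.equal (pvMatchSet all p) (pvMatchSet tgt p) := by
  set pre := fun a => PySem.Str.startswith a p with hpre
  set LT := (PySem.Set.ofList tgt).filter pre with hLT
  set LA := (PySem.Set.ofList all).filter pre with hLA
  set LU := (PySem.Set.union (PySem.Set.ofList tgt) (PySem.Set.ofList all)).filter pre with hLU
  have ndT : LT.Nodup := (PySem.Set.nodup_ofList tgt).filter pre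
  have ndA : LA.Nodup := (PySem.Set.nodup_ofList all).filter pre
  have ndU : LU.Nodup :=
    (PySem.Set.nodup_union (PySem.Set.ofList tgt) (PySem.Set.ofList all)
      (PySem.Set.nodup_ofList tgt)).filter pre
  have memT : ∀ x, x ∈ LT ↔ (x ∈ tgt ∧ pre x = true) := by
    intro x
    rw [hLT, List.mem_filter, PySem.Set.mem_ofList]
  have memA : ∀ x, x ∈ LA ↔ (x ∈ all ∧ pre x = true) := by
    intro x
    rw [hLA, List.mem_filter, PySem.Set.mem_ofList]
  have memU : ∀ x, x ∈ LU ↔ ((x ∈ tgt ∨ x ∈ all) ∧ pre x = true) := by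
    intro x
    rw [hLU, List.mem_filter, PySem.Set.mem_union, PySem.Set.mem_ofList, PySem.Set.mem_ofList]
  rw [Bool.eq_iff_iff]
  constructor
  · intro hv
    have hv' : (pvCnt (PySem.Set.ofList all)).getD p 0 = (pvCnt (PySem.Set.ofList tgt)).getD p 0 ∧
        (pvCnt (PySem.Set.ofList tgt)).getD p 0
          = (pvCnt (PySem.Set.union (PySem.Set.ofList tgt) (PySem.Set.ofList all))).getD p 0 := by
      simpa [pvValidB, Bool.and_eq_true, beq_iff_eq] using hv
    rw [pv_getD_pvCnt _ _ hp, pv_getD_pvCnt _ _ hp] at hv'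
    rcases hv' with ⟨h1, h2⟩
    rw [pv_getD_pvCnt _ _ hp] at h2
    have hlenAT : LA.length = LT.length := by exact_mod_cast h1
    have hlenTU : LT.length = LU.length := by exact_mod_cast h2
    have hsubT : LT.toFinset ⊆ LU.toFinset := by
      intro x hx
      rw [List.mem_toFinset] at *
      rw [memU]
      have := (memT x).mp hx
      exact ⟨Or.inl this.1, this.2⟩
    have hsubA : LA.toFinset ⊆ LU.toFinset := by
      intro x hx
      rw [List.mem_toFinset] at *
      rw [memU]
      have := (memA x).mp hx
      exact ⟨Or.inr this.1, this.2⟩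
    have hcT : LT.toFinset = LU.toFinset := by
      apply Finset.eq_of_subset_of_card_le hsubT
      rw [List.toFinset_card_of_nodup ndT, List.toFinset_card_of_nodup ndU]
      omega
    have hcA : LA.toFinset = LU.toFinset := by
      apply Finset.eq_of_subset_of_card_le hsubA
      rw [List.toFinset_card_of_nodup ndA, List.toFinset_card_of_nodup ndU]
      omega
    rw [PySem.Set.equal_iff]
    intro x
    have hx : x ∈ LA ↔ x ∈ LT := by
      rw [← List.mem_toFinset, ← List.mem_toFinset (l := LT), hcA, hcT]
    rw [memA, memT] at hx
    simp only [pvMatchSet, PySem.Set.mem_ofList, List.mem_filter]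
    exact hx
  · intro he
    rw [PySem.Set.equal_iff] at he
    have hiff : ∀ x, (x ∈ all ∧ pre x = true) ↔ (x ∈ tgt ∧ pre x = true) := by
      intro x
      have := he x
      simpa only [pvMatchSet, PySem.Set.mem_ofList, List.mem_filter] using this
    have hAT : LA.length = LT.length := by
      have : LA.Perm LT := by
        rw [List.perm_ext_iff_of_nodup ndA ndT]
        intro x
        rw [memA, memT]
        exact hiff x
      exact this.length_eq
    have hTU : LT.length = LU.length := by
      have : LT.Perm LU := by
        rw [List.perm_ext_iff_of_nodup ndT ndU]
        intro x
        rw [memT, memU]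
        constructor
        · rintro ⟨hx, hpx⟩
          exact ⟨Or.inl hx, hpx⟩
        · rintro ⟨hx | hx, hpx⟩
          · exact ⟨hx, hpx⟩
          · exact ⟨((hiff x).mp ⟨hx, hpx⟩).1, hpx⟩
      exact this.length_eq
    simp only [pvValidB, Bool.and_eq_true, beq_iff_eq]
    rw [pv_getD_pvCnt _ _ hp, pv_getD_pvCnt _ _ hp, pv_getD_pvCnt _ _ hp]
    constructor
    · exact_mod_cast hAT
    · exact_mod_cast hTU

-- the two inner searches agree (A additionally returns the matched-target set)
theorem pv_find_eq (tgt all : List String) (t : String) (ks : List Int)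
    (hks : ∀ k ∈ ks, 1 ≤ k ∧ k ≤ PySem.Str.len t) :
    pvFindA tgt all t none PySem.Set.empty ks =
      (match pvFindB (pvCnt (PySem.Set.ofList tgt)) (pvCnt (PySem.Set.ofList all))
          (pvCnt (PySem.Set.union (PySem.Set.ofList tgt) (PySem.Set.ofList all))) t ks with
        | some p => (some p, pvMatchSet tgt p)
        | none => (none, PySem.Set.empty)) := by
  induction ks with
  | nil => simp [pvFindA, pvFindB]
  | cons k ks ih =>
    have hk := hks k (List.mem_cons_self ..)
    have hp : (PySem.Str.slice t none (some k)).toList ≠ [] := by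
      rw [pv_toList_slice_to _ _ (by omega)]
      intro h
      have hlen := congrArg List.length h
      simp only [List.length_take, List.length_nil] at hlen
      have h2 := hk.2
      rw [PySem.Str.len_eq] at h2
      omega
    simp only [pvFindA, pvFindB]
    rw [← pv_validB_eq tgt all _ hp]
    by_cases hv : pvValidB (pvCnt (PySem.Set.ofList tgt)) (pvCnt (PySem.Set.ofList all))
        (pvCnt (PySem.Set.union (PySem.Set.ofList tgt) (PySem.Set.ofList all)))
        (PySem.Str.slice t none (some k)) = true
    · simp [hv]
    · simp only [Bool.not_eq_true] at hv
      simp only [hv, Bool.false_eq_true, if_false]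
      exact ih (fun k hk' => hks k (List.mem_cons_of_mem _ hk'))

-- the two outer loops agree from any state
theorem pv_loop_eq (service : String) (tgt all : List String) (minLen : Int)
    (hmin : 1 ≤ minLen) (ts : List String) (st : List String × PySem.Set String) :
    pvLoopA service tgt all minLen ts st =
      pvLoopB service tgt (pvCnt (PySem.Set.ofList tgt)) (pvCnt (PySem.Set.ofList all))
        (pvCnt (PySem.Set.union (PySem.Set.ofList tgt) (PySem.Set.ofList all))) minLen ts st := by
  induction ts generalizing st with
  | nil => rfl
  | cons t ts ih =>
    obtain ⟨results, covered⟩ := st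
    simp only [pvLoopA, pvLoopB]
    by_cases hc : PySem.Set.contains covered t = true
    · simp only [hc, if_true]
      exact ih _
    · simp only [Bool.not_eq_true] at hc
      simp only [hc, Bool.false_eq_true, if_false]
      rw [pv_find_eq tgt all t _ (by
        intro k hk
        have := PySem.List.mem_pyRange_one.mp hk
        omega)]
      cases hfb : pvFindB (pvCnt (PySem.Set.ofList tgt)) (pvCnt (PySem.Set.ofList all))
          (pvCnt (PySem.Set.union (PySem.Set.ofList tgt) (PySem.Set.ofList all))) t
          (PySem.List.pyRange minLen (PySem.Str.len t + 1)) with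
      | none =>
        simp only []
        exact ih _
      | some best =>
        simp only []
        by_cases hb : (PySem.Str.len best < PySem.Str.len t
            || PySem.Set.len (pvMatchSet tgt best) > 1) = true
        · simp only [hb, if_true]
          exact ih _
        · simp only [Bool.not_eq_true] at hb
          simp only [hb, Bool.false_eq_true, if_false]
          exact ih _

-- ===== VERDICT (by name: the statement is the Claim_ definition above) =====
theorem minimize_service_actions_py_spec : Claim_equal_minimize_service_actions_py := by
  intro service tgt all minchars _
  unfold Spec_minimize_service_actions_py minimize_service_actions_py minimize_service_actions_py_alt
  rw [pv_loop_eq service tgt all (max 1 minchars) (le_max_left 1 minchars)]
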